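-- pv_equiv track=rewrite | github.com/Master-Bibash/python | new_pyhton_chapter/solution/seven.py | evenandoddnumbersupto
-- ===== SOURCE A (Python) =====
-- def evenandoddnumbersupto(limit):
--     evens = []
--     odds = []
--     num = 0
--     while num <= limit:
--         if num % 2 == 0:
--             evens.append(num)
--         else:
--             odds.append(num)
--         num += 1
--     return evens, odds
-- ===== SOURCE B (Python) =====
-- def evenandoddnumbersupto(limit):
--     evens = list(range(0, limit + 1, 2))
--     odds = list(range(1, limit + 1, 2))
--     return evens, odds
-- ===== Notes on version B (the rewrite author's own statement) =====
-- stated objective: simpler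
-- what changed: Replaces the single counting loop with a parity branch by two strided ranges (step 2) built directly, so the modulo test and the branching disappear.
import Mathlib
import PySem

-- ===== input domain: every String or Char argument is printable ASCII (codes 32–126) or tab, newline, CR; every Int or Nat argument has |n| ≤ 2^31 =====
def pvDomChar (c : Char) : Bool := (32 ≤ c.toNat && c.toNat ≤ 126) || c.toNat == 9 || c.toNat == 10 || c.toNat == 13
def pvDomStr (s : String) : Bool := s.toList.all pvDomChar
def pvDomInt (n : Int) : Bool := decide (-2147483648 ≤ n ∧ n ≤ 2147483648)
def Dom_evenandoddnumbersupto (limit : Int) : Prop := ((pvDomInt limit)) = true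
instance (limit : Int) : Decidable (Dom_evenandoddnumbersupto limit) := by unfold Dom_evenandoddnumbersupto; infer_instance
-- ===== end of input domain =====

-- B builds the two lists directly as strided ranges (step 2), replacing A's single counting loop with its parity branch; same O(limit) cost, simpler.


-- ===== PORT A =====
-- while num <= limit: append to evens/odds by parity, num += 1
def pvLoopA (limit num : Int) (evens odds : List Int) : List Int × List Int :=
  if num ≤ limit then
    if PySem.Int.mod num 2 = 0 then pvLoopA limit (num + 1) (evens ++ [num]) odds
    else pvLoopA limit (num + 1) evens (odds ++ [num])
  else (evens, odds)
termination_by (limit + 1 - num).toNat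
decreasing_by all_goals omega

def evenandoddnumbersupto (limit : Int) : List Int × List Int :=
  pvLoopA limit 0 [] []

-- ===== PORT B =====
def evenandoddnumbersupto_alt (limit : Int) : List Int × List Int :=
  (PySem.List.pyRange 0 (limit + 1) 2, PySem.List.pyRange 1 (limit + 1) 2)

-- ===== PRECONDITION & SPEC =====
def Spec_evenandoddnumbersupto (limit : Int) (out : List Int × List Int) : Prop := out = evenandoddnumbersupto_alt limit
instance (limit : Int) (out : List Int × List Int) : Decidable (Spec_evenandoddnumbersupto limit out) := by unfold Spec_evenandoddnumbersupto; infer_instance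

-- ===== CLAIM (what is proved, stated in full; the proofs are below) =====
def Claim_equal_evenandoddnumbersupto : Prop := ∀ (limit : Int), Dom_evenandoddnumbersupto limit → Spec_evenandoddnumbersupto limit (evenandoddnumbersupto limit)

-- ===== LEMMAS AND PROOFS =====

theorem pvRange_two_nil (a b : Int) (h : b ≤ a) : PySem.List.pyRange a b 2 = [] := by
  rw [PySem.List.pyRange_of_pos a b (by norm_num)]
  rw [if_neg (by omega)]
  simp

theorem pvRange_two_cons (a b : Int) (h : a < b) :
    PySem.List.pyRange a b 2 = a :: PySem.List.pyRange (a + 2) b 2 := by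
  rw [PySem.List.pyRange_of_pos a b (by norm_num),
      PySem.List.pyRange_of_pos (a + 2) b (by norm_num)]
  rw [if_pos h]
  have hN : ((b - a + 2 - 1) / 2).toNat
      = (if a + 2 < b then ((b - (a + 2) + 2 - 1) / 2).toNat else 0) + 1 := by
    split_ifs with h2 <;> omega
  rw [hN, List.range_succ_eq_map]
  simp [List.map_map, Function.comp]
  intro k _
  ring

theorem pvLoopA_eq_aux (limit : Int) : ∀ (n : Nat) (num : Int),
    (limit + 1 - num).toNat ≤ n → ∀ (E O : List Int),
    pvLoopA limit num E O =
      if num % 2 = 0 then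
        (E ++ PySem.List.pyRange num (limit + 1) 2, O ++ PySem.List.pyRange (num + 1) (limit + 1) 2)
      else
        (E ++ PySem.List.pyRange (num + 1) (limit + 1) 2, O ++ PySem.List.pyRange num (limit + 1) 2) := by
  intro n
  induction n with
  | zero =>
    intro num hn E O
    have hle : ¬ num ≤ limit := by omega
    rw [pvLoopA, if_neg hle]
    have h1 : PySem.List.pyRange num (limit + 1) 2 = [] := pvRange_two_nil _ _ (by omega)
    have h2 : PySem.List.pyRange (num + 1) (limit + 1) 2 = [] := pvRange_two_nil _ _ (by omega)
    split_ifs <;> simp [h1, h2]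
  | succ n ih =>
    intro num hn E O
    rw [pvLoopA]
    by_cases hle : num ≤ limit
    · rw [if_pos hle]
      have hmod : PySem.Int.mod num 2 = num % 2 :=
        PySem.Int.mod_eq_emod_of_pos (by norm_num)
      have hpar : num % 2 = 0 ∨ num % 2 = 1 := by omega
      have h12 : num + 1 + 1 = num + 2 := by ring
      rcases hpar with hp | hp
      · rw [hmod, if_pos hp, ih (num + 1) (by omega)]
        rw [if_neg (by omega)]
        rw [if_pos hp, pvRange_two_cons num (limit + 1) (by omega)]
        simp [h12]
      · rw [hmod, if_neg (by omega), ih (num + 1) (by omega)]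
        rw [if_pos (by omega)]
        rw [if_neg (by omega), pvRange_two_cons num (limit + 1) (by omega)]
        simp [h12]
    · rw [if_neg hle]
      have h1 : PySem.List.pyRange num (limit + 1) 2 = [] := pvRange_two_nil _ _ (by omega)
      have h2 : PySem.List.pyRange (num + 1) (limit + 1) 2 = [] := pvRange_two_nil _ _ (by omega)
      split_ifs <;> simp [h1, h2]

theorem pvLoopA_eq (limit : Int) (num : Int) (E O : List Int) :
    pvLoopA limit num E O =
      if num % 2 = 0 then
        (E ++ PySem.List.pyRange num (limit + 1) 2, O ++ PySem.List.pyRange (num + 1) (limit + 1) 2)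
      else
        (E ++ PySem.List.pyRange (num + 1) (limit + 1) 2, O ++ PySem.List.pyRange num (limit + 1) 2) :=
  pvLoopA_eq_aux limit ((limit + 1 - num).toNat) num (le_refl _) E O

-- ===== VERDICT (by name: the statement is the Claim_ definition above) =====
theorem evenandoddnumbersupto_spec : Claim_equal_evenandoddnumbersupto := by
  intro limit _
  unfold Spec_evenandoddnumbersupto evenandoddnumbersupto evenandoddnumbersupto_alt
  rw [pvLoopA_eq limit 0 [] []]
  norm_num
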